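-- pv_equiv track=rewrite | github.com/c0ntradicti0n/self-reading-library | python/layout/Layout2ReadingOrder.py | enumerate_words
-- ===== SOURCE A (Python) =====
-- def enumerate_words(all_texts):
--     i = 0
--     all_enumeration = []
--     for texts in all_texts:
--         enumeration = []
--         for word in " ".join([text for text, box in texts]).split(" "):
--             enumeration.append((i, word))
--             i += 1
--         enumeration.append((i, "\n    "))
--         i += 1
--         all_enumeration.append(enumeration)
--
--     return all_enumeration
-- ===== SOURCE B (Python) =====
-- def enumerate_words(all_texts):
--     # Pass 1: per-group token lists (sentinel "\n    " included).
--     token_groups = [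
--         " ".join(text for text, box in texts).split(" ") + ["\n    "]
--         for texts in all_texts
--     ]
--     # Pass 2: prefix-sum offsets.
--     offsets = [0]
--     for toks in token_groups:
--         offsets.append(offsets[-1] + len(toks))
--     # Pass 3: number each group independently from its offset.
--     return [
--         [(off + j, tok) for j, tok in enumerate(toks)]
--         for toks, off in zip(token_groups, offsets)
--     ]
-- ===== Notes on version B (the rewrite author's own statement) =====
-- stated objective: alternative
-- what changed: Replaces the single mutable running index threaded through nested loops with three independent passes: materialize each group's token list (sentinel included), build a prefix-sum offset table, then number each group independently from its offset.
import Mathlib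
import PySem

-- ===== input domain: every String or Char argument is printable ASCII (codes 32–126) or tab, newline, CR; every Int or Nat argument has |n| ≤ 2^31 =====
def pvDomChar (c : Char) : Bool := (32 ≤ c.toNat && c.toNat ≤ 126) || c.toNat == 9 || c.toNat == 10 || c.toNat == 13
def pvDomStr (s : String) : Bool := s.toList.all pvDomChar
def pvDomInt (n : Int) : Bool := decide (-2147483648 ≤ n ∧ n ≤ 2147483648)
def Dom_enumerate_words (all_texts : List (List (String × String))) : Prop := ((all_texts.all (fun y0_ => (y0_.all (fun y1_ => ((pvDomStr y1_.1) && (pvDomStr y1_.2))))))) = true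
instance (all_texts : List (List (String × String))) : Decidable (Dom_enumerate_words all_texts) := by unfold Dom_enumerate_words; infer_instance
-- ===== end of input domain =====

-- B replaces A's single mutable running index threaded through nested loops by three
-- independent passes (token lists per group, a prefix-sum offset table, independent
-- per-group numbering); objective: alternative decomposition, same cost.

-- ===== PORT A =====
-- inner loop body: enumeration.append((i, word)); i += 1
def pvInnerA (q : Int × List (Int × String)) (word : String) : Int × List (Int × String) :=
  (q.1 + 1, q.2 ++ [(q.1, word)])

-- outer loop body of A
def pvStepA (st : Int × List (List (Int × String))) (texts : List (String × String)) :
    Int × List (List (Int × String)) :=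
  -- " ".join([text for text, box in texts]).split(" ") ; sep " " ≠ "" so split? is always some
  let words := (PySem.Str.split? (PySem.Str.join " " (texts.map (fun tb => tb.1))) " ").getD []
  let p := words.foldl pvInnerA (st.1, [])
  (p.1 + 1, st.2 ++ [p.2 ++ [(p.1, "\n    ")]])

def enumerate_words (all_texts : List (List (String × String))) : List (List (Int × String)) :=
  (all_texts.foldl pvStepA (0, [])).2

-- ===== PORT B =====
-- pass 1 helper: one group's token list, sentinel included
def pvTokensOf (texts : List (String × String)) : List String :=
  (PySem.Str.split? (PySem.Str.join " " (texts.map (fun tb => tb.1))) " ").getD [] ++ ["\n    "]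

def enumerate_words_alt (all_texts : List (List (String × String))) : List (List (Int × String)) :=
  let groups := all_texts.map pvTokensOf
  -- pass 2: prefix-sum offsets (offsets[-1] = last element; list starts [0], never empty)
  let offsets := groups.foldl (fun (os : List Int) toks => os ++ [os.getLast?.getD 0 + (toks.length : Int)]) [0]
  -- pass 3: zip truncates to groups.length; enumerate = mapIdx
  (groups.zip offsets).map (fun p => p.1.mapIdx (fun j tok => (p.2 + (j : Int), tok)))

-- ===== PRECONDITION & SPEC =====
def Spec_enumerate_words (all_texts : List (List (String × String))) (out : List (List (Int × String))) : Prop := out = enumerate_words_alt all_texts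
instance (all_texts : List (List (String × String))) (out : List (List (Int × String))) : Decidable (Spec_enumerate_words all_texts out) := by unfold Spec_enumerate_words; infer_instance

-- ===== CLAIM (what is proved, stated in full; the proofs are below) =====
def Claim_equal_enumerate_words : Prop := ∀ (all_texts : List (List (String × String))), Dom_enumerate_words all_texts → Spec_enumerate_words all_texts (enumerate_words all_texts)

-- ===== LEMMAS AND PROOFS =====

-- reference: the groups numbered consecutively starting at i
def pvRef : Int → List (List String) → List (List (Int × String))
  | _, [] => []
  | i, g :: gs => g.mapIdx (fun j tok => (i + (j : Int), tok)) :: pvRef (i + (g.length : Int)) gs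

-- reference offsets: prefix sums starting after t
def pvOffs : Int → List (List String) → List Int
  | _, [] => []
  | t, g :: gs => (t + (g.length : Int)) :: pvOffs (t + (g.length : Int)) gs

theorem pvInnerA_foldl (ws : List String) : ∀ (i : Int) (acc : List (Int × String)),
    ws.foldl pvInnerA (i, acc) =
      (i + (ws.length : Int), acc ++ ws.mapIdx (fun j w => (i + (j : Int), w))) := by
  induction ws with
  | nil => intro i acc; simp
  | cons w ws ih =>
    intro i acc
    simp only [List.foldl_cons, pvInnerA, List.mapIdx_cons]
    rw [ih]
    have hf : (fun (j : Nat) (v : String) => (i + 1 + (j : Int), v)) =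
        (fun (j : Nat) (v : String) => (i + ((j : Nat) + 1 : Nat), v)) := by
      funext j v; congr 1; push_cast; ring
    simp only [Prod.mk.injEq, List.length_cons, Nat.cast_add, Nat.cast_one, Nat.cast_zero,
      add_zero, List.append_assoc, List.singleton_append, hf]
    exact ⟨by ring, trivial⟩

theorem pvStepA_foldl (ts : List (List (String × String))) :
    ∀ (i : Int) (acc : List (List (Int × String))),
    ts.foldl pvStepA (i, acc) =
      (i + ((ts.map pvTokensOf).map List.length).sum,
       acc ++ pvRef i (ts.map pvTokensOf)) := by
  induction ts with
  | nil => intro i acc; simp [pvRef]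
  | cons t ts ih =>
    intro i acc
    have hstep : pvStepA (i, acc) t =
        (i + ((pvTokensOf t).length : Int),
         acc ++ [(pvTokensOf t).mapIdx (fun j w => (i + (j : Int), w))]) := by
      simp only [pvStepA, pvInnerA_foldl, pvTokensOf, Prod.mk.injEq]
      refine ⟨by push_cast [List.length_append]; simp; ring, ?_⟩
      congr 1
      rw [List.mapIdx_append]
      simp
    rw [List.foldl_cons, hstep, ih]
    simp only [List.map_cons, List.map, List.sum_cons, pvRef, Prod.mk.injEq]
    refine ⟨by push_cast; ring, by simp⟩

theorem pvOffs_foldl (gs : List (List String)) : ∀ (os : List Int) (t : Int),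
    os.getLast?.getD 0 = t →
    gs.foldl (fun (os : List Int) toks => os ++ [os.getLast?.getD 0 + (toks.length : Int)]) os =
      os ++ pvOffs t gs := by
  induction gs with
  | nil => intro os t _; simp [pvOffs]
  | cons g gs ih =>
    intro os t ht
    simp only [List.foldl_cons, pvOffs]
    rw [ht, ih (os ++ [t + (g.length : Int)]) (t + (g.length : Int)) (by simp)]
    simp

theorem pvZip_ref (gs : List (List String)) : ∀ (t : Int),
    ((gs.zip (t :: pvOffs t gs)).map
        (fun p => p.1.mapIdx (fun j tok => (p.2 + (j : Int), tok)))) = pvRef t gs := by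
  induction gs with
  | nil => intro t; simp [pvRef]
  | cons g gs ih =>
    intro t
    simp only [pvOffs, List.zip_cons_cons, List.map_cons, pvRef]
    rw [ih]

-- ===== VERDICT (by name: the statement is the Claim_ definition above) =====
theorem enumerate_words_spec : Claim_equal_enumerate_words := by
  intro all_texts _
  simp only [Spec_enumerate_words, enumerate_words, enumerate_words_alt]
  rw [pvStepA_foldl, pvOffs_foldl _ [0] 0 (by simp)]
  simp only [List.nil_append, List.singleton_append]
  rw [pvZip_ref]
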